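-- pv_equiv track=rewrite | github.com/marcelodutilh/HR_Interview_Check | JobSearch/ai.py | _build_rubric_text
-- ===== SOURCE A (Python) =====
-- def _build_rubric_text(competencies):
--     if not competencies:
--         return "No rubric defined — use your professional judgment."
--     lines = []
--     for c in competencies:
--         lines.append(f"**{c['name']}**")
--         if c.get("strong"):
--             lines.append(f"  - Strong:      {c['strong']}")
--         if c.get("acceptable"):
--             lines.append(f"  - Acceptable:  {c['acceptable']}")
--         if c.get("weak"):
--             lines.append(f"  - Weak:        {c['weak']}")
--     return "\n".join(lines)
-- ===== SOURCE B (Python) =====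
-- def _seg(c, key, label):
--     v = c.get(key)
--     return "\n  - " + label + v if v else ""
--
--
-- def _build_rubric_text(competencies):
--     if not competencies:
--         return "No rubric defined — use your professional judgment."
--     c, tail = competencies[0], competencies[1:]
--     block = ("**" + c["name"] + "**"
--              + _seg(c, "strong", "Strong:      ")
--              + _seg(c, "acceptable", "Acceptable:  ")
--              + _seg(c, "weak", "Weak:        "))
--     return block if not tail else block + "\n" + _build_rubric_text(tail)
-- ===== Notes on version B (the rewrite author's own statement) =====
-- stated objective: alternative
-- what changed: A builds one flat list of lines with an imperative loop and joins it once at the end; B is a head/tail recursion that never builds a line list: each competency's block is assembled by direct string concatenation of conditionally-empty segments and glued to the recursively built rest with an explicit separator.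
import Mathlib
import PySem

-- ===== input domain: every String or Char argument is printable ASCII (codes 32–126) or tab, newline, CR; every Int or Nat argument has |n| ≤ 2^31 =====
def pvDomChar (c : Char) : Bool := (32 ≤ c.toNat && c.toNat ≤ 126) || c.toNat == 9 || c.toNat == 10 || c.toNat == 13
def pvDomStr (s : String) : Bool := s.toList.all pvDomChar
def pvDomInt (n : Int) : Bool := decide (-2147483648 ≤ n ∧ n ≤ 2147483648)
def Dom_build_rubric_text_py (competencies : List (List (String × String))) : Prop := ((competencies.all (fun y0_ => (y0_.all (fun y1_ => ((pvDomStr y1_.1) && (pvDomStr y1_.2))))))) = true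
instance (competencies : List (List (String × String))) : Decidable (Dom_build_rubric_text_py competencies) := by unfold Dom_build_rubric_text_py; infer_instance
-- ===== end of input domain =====

-- B replaces A's loop-plus-final-join (a flat accumulated line list) by a head/tail recursion
-- that concatenates conditionally-empty string segments directly, never building a line list
-- (alternative decomposition; same cost).

-- truthiness of `c.get(key)` for a string value: None and "" are falsy
def pvTruthy (o : Option String) : Bool :=
  match o with
  | some s => s ≠ ""
  | none => false

-- ===== PORT A =====
def build_rubric_text_py (competencies : List (List (String × String))) : String :=
  if competencies = [] then
    "No rubric defined — use your professional judgment."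
  else
    let lines := competencies.foldl (fun lines c =>
      let d : PySem.Dict String String := PySem.Dict.ofList c
      -- c['name'] raises KeyError when absent; Pre_ excludes that, so .getD "" is never taken
      let lines := lines ++ ["**" ++ ((d.get? "name").getD "") ++ "**"]
      let lines := if pvTruthy (d.get? "strong") then lines ++ ["  - Strong:      " ++ ((d.get? "strong").getD "")] else lines
      let lines := if pvTruthy (d.get? "acceptable") then lines ++ ["  - Acceptable:  " ++ ((d.get? "acceptable").getD "")] else lines
      if pvTruthy (d.get? "weak") then lines ++ ["  - Weak:        " ++ ((d.get? "weak").getD "")] else lines) []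
    PySem.Str.join "\n" lines

-- ===== PORT B =====
-- _seg: "\n  - " + label + v if the value is truthy, else the empty segment
def pvSeg (c : List (String × String)) (key label : String) : String :=
  let v := (PySem.Dict.ofList c).get? key
  if pvTruthy v then "\n  - " ++ label ++ v.getD "" else ""

-- one competency's block, concatenated directly (Python B's local `block`)
def pvBlockStr (c : List (String × String)) : String :=
  "**" ++ (((PySem.Dict.ofList c).get? "name").getD "") ++ "**"
    ++ pvSeg c "strong" "Strong:      "
    ++ pvSeg c "acceptable" "Acceptable:  "
    ++ pvSeg c "weak" "Weak:        "

def build_rubric_text_py_alt : List (List (String × String)) → String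
  | [] => "No rubric defined — use your professional judgment."
  | c :: tail =>
    if tail = [] then pvBlockStr c else pvBlockStr c ++ "\n" ++ build_rubric_text_py_alt tail

-- ===== PRECONDITION & SPEC =====
-- Pre_ excludes exactly the inputs on which A raises KeyError: a competency dict without a "name" key.
def Pre_build_rubric_text_py (competencies : List (List (String × String))) : Prop :=
  (competencies.all (fun c => c.any (fun p => p.1 == "name"))) = true
instance (competencies : List (List (String × String))) : Decidable (Pre_build_rubric_text_py competencies) := by unfold Pre_build_rubric_text_py; infer_instance

def pvWitness_build_rubric_text_py : (List (List (String × String))) :=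
  [[("name", "Python"), ("strong", "deep"), ("weak", "")], [("name", "SQL"), ("acceptable", "ok")]]

def Spec_build_rubric_text_py (competencies : List (List (String × String))) (out : String) : Prop := out = build_rubric_text_py_alt competencies
instance (competencies : List (List (String × String))) (out : String) : Decidable (Spec_build_rubric_text_py competencies out) := by unfold Spec_build_rubric_text_py; infer_instance

-- ===== CLAIM (what is proved, stated in full; the proofs are below) =====
def Claim_equal_build_rubric_text_py : Prop := ∀ (competencies : List (List (String × String))), Dom_build_rubric_text_py competencies → Pre_build_rubric_text_py competencies → Spec_build_rubric_text_py competencies (build_rubric_text_py competencies)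

-- ===== LEMMAS AND PROOFS =====

-- the lines A appends for one competency
def pvBlockLines (c : List (String × String)) : List String :=
  let d : PySem.Dict String String := PySem.Dict.ofList c
  ("**" ++ ((d.get? "name").getD "") ++ "**") ::
    ((if pvTruthy (d.get? "strong") then ["  - Strong:      " ++ ((d.get? "strong").getD "")] else []) ++
     (if pvTruthy (d.get? "acceptable") then ["  - Acceptable:  " ++ ((d.get? "acceptable").getD "")] else []) ++
     (if pvTruthy (d.get? "weak") then ["  - Weak:        " ++ ((d.get? "weak").getD "")] else []))

theorem pv_step_eq (lines : List String) (c : List (String × String)) :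
    (let d : PySem.Dict String String := PySem.Dict.ofList c
     let lines := lines ++ ["**" ++ ((d.get? "name").getD "") ++ "**"]
     let lines := if pvTruthy (d.get? "strong") then lines ++ ["  - Strong:      " ++ ((d.get? "strong").getD "")] else lines
     let lines := if pvTruthy (d.get? "acceptable") then lines ++ ["  - Acceptable:  " ++ ((d.get? "acceptable").getD "")] else lines
     if pvTruthy (d.get? "weak") then lines ++ ["  - Weak:        " ++ ((d.get? "weak").getD "")] else lines)
    = lines ++ pvBlockLines c := by
  simp only [pvBlockLines]
  split_ifs <;> simp_all

theorem pv_foldA (cs : List (List (String × String))) (acc : List String) :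
    cs.foldl (fun lines c =>
      let d : PySem.Dict String String := PySem.Dict.ofList c
      let lines := lines ++ ["**" ++ ((d.get? "name").getD "") ++ "**"]
      let lines := if pvTruthy (d.get? "strong") then lines ++ ["  - Strong:      " ++ ((d.get? "strong").getD "")] else lines
      let lines := if pvTruthy (d.get? "acceptable") then lines ++ ["  - Acceptable:  " ++ ((d.get? "acceptable").getD "")] else lines
      if pvTruthy (d.get? "weak") then lines ++ ["  - Weak:        " ++ ((d.get? "weak").getD "")] else lines) acc
    = acc ++ cs.flatMap pvBlockLines := by
  induction cs generalizing acc with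
  | nil => simp
  | cons c cs ih =>
    rw [List.foldl_cons, List.flatMap_cons, pv_step_eq acc c, ih, List.append_assoc]

theorem pv_join_cons (sep x : List Char) (bs : List (List Char))
    (hb : bs ≠ []) :
    PySem.Chars.join sep (x :: bs) = x ++ sep ++ PySem.Chars.join sep bs := by
  cases bs with
  | nil => simp at hb
  | cons y ys => exact PySem.Chars.join_cons_cons sep x y ys

theorem pv_join_append_ne (sep : List Char) (xs ys : List (List Char))
    (hx : xs ≠ []) (hy : ys ≠ []) :
    PySem.Chars.join sep (xs ++ ys) = PySem.Chars.join sep xs ++ sep ++ PySem.Chars.join sep ys := by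
  induction xs with
  | nil => simp at hx
  | cons a as ih =>
    cases as with
    | nil =>
      simp only [List.singleton_append]
      rw [pv_join_cons sep a ys hy]
      rw [show PySem.Chars.join sep [a] = a from PySem.Chars.join_singleton sep a]
    | cons b bs =>
      rw [List.cons_append, pv_join_cons sep a ((b :: bs) ++ ys) (by simp),
          ih (by simp), pv_join_cons sep a (b :: bs) (by simp)]
      simp [List.append_assoc]

-- equal toList means equal strings
theorem pv_str_ext (s t : String) (h : s.toList = t.toList) : s = t := by
  have := congrArg String.ofList h
  simpa using this

-- joining one competency's lines with "\n" is exactly B's directly concatenated block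
theorem pv_block_join (c : List (String × String)) :
    PySem.Str.join "\n" (pvBlockLines c) = pvBlockStr c := by
  apply pv_str_ext
  simp only [pvBlockLines, pvSeg, pvBlockStr]
  split_ifs <;>
    simp [PySem.Str.toList_join, PySem.Chars.join_cons_cons, PySem.Chars.join_singleton,
      String.toList_append]

-- unfolding B's recursion one step on a list of length ≥ 2
theorem pv_alt_cons (c c' : List (String × String)) (t : List (List (String × String))) :
    build_rubric_text_py_alt (c :: c' :: t)
      = pvBlockStr c ++ "\n" ++ build_rubric_text_py_alt (c' :: t) := by
  rw [show build_rubric_text_py_alt (c :: c' :: t)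
        = if (c' :: t) = [] then pvBlockStr c
          else pvBlockStr c ++ "\n" ++ build_rubric_text_py_alt (c' :: t) from rfl,
      if_neg (by simp)]

-- string-level join splits over append of nonempty line lists
theorem pv_str_join_append (sep : String) (xs ys : List String)
    (hx : xs ≠ []) (hy : ys ≠ []) :
    PySem.Str.join sep (xs ++ ys) = PySem.Str.join sep xs ++ sep ++ PySem.Str.join sep ys := by
  apply pv_str_ext
  simp only [PySem.Str.toList_join, String.toList_append, List.map_append]
  exact pv_join_append_ne _ _ _ (by simpa using hx) (by simpa using hy)

-- B equals the join of A's flattened line blocks on every nonempty input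
theorem pv_alt_eq_join (cs : List (List (String × String))) (h : cs ≠ []) :
    build_rubric_text_py_alt cs = PySem.Str.join "\n" (cs.flatMap pvBlockLines) := by
  induction cs with
  | nil => simp at h
  | cons c tail ih =>
    cases tail with
    | nil =>
      simp only [List.flatMap_cons, List.flatMap_nil, List.append_nil, pv_block_join c]
      rfl
    | cons c' tail' =>
      rw [pv_alt_cons, ih (by simp)]
      conv_rhs => rw [List.flatMap_cons]
      rw [pv_str_join_append "\n" _ _ (by simp [pvBlockLines])
            (by simp [List.flatMap_cons, pvBlockLines]),
          pv_block_join c]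

-- ===== VERDICT (by name: the statement is the Claim_ definition above) =====
theorem build_rubric_text_py_spec : Claim_equal_build_rubric_text_py := by
  intro cs _ _
  unfold Spec_build_rubric_text_py build_rubric_text_py
  by_cases h : cs = []
  · simp [h, build_rubric_text_py_alt]
  · simp only [if_neg h]
    rw [pv_foldA cs [], List.nil_append, pv_alt_eq_join cs h]
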